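-- pv_equiv track=rewrite | github.com/justinloo12/beat-the-books-public | src/mlb_model/services/simulation_model.py | _apply_outcome
-- ===== SOURCE A (Python) =====
-- def _apply_outcome(outcome: str, bases: list[int | None], batter_id: int) -> tuple[int, int, list[int | None], int]:
--     first, second, third = bases
--     runs = 0
--     rbi = 0
--     outs = 0
--     if outcome in {"k", "out"}:
--         return 0, 1, bases, 0
--     if outcome == "bb":
--         if first is not None and second is not None and third is not None:
--             runs += 1
--             rbi += 1
--             return runs, outs, [batter_id, first, second], rbi
--         if first is not None and second is not None:
--             return runs, outs, [batter_id, first, second], rbi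
--         if first is not None:
--             return runs, outs, [batter_id, first, third], rbi
--         return runs, outs, [batter_id, second, third], rbi
--     if outcome == "1b":
--         if third is not None:
--             runs += 1
--             rbi += 1
--         return runs, outs, [batter_id, first, second], rbi
--     if outcome == "2b":
--         if second is not None:
--             runs += 1
--             rbi += 1
--         if third is not None:
--             runs += 1
--             rbi += 1
--         return runs, outs, [None, batter_id, first], rbi
--     if outcome == "3b":
--         for runner in (first, second, third):
--             if runner is not None:
--                 runs += 1
--                 rbi += 1
--         return runs, outs, [None, None, batter_id], rbi
--     if outcome == "hr":
--         for runner in (first, second, third):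
--             if runner is not None:
--                 runs += 1
--                 rbi += 1
--         runs += 1
--         rbi += 1
--         return runs, outs, [None, None, None], rbi
--     return runs, outs, bases, rbi
-- ===== SOURCE B (Python) =====
-- def _apply_outcome(outcome, bases, batter_id):
--     first, second, third = bases
--     if outcome in ("k", "out"):
--         return 0, 1, bases, 0
--     if outcome == "bb":
--         # forced-advancement chain: batter to first, runners push only when forced
--         if first is None:
--             return 0, 0, [batter_id, second, third], 0
--         if second is None:
--             return 0, 0, [batter_id, first, third], 0
--         if third is None:
--             return 0, 0, [batter_id, first, second], 0
--         return 1, 0, [batter_id, first, second], 1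
--     adv = {"1b": 1, "2b": 2, "3b": 3, "hr": 4}.get(outcome)
--     if adv is None:
--         return 0, 0, bases, 0
--     runners = [batter_id, first, second, third]  # positions 0 (batter) .. 3 (third)
--     runs = sum(1 for pos in range(4) if pos + adv >= 4 and runners[pos] is not None)
--     new_bases = [runners[p - adv] if p - adv >= 0 else None for p in (1, 2, 3)]
--     return runs, 0, new_bases, runs
-- ===== Notes on version B (the rewrite author's own statement) =====
-- stated objective: simpler
-- what changed: The four hardcoded hit branches (1b/2b/3b/hr) are replaced by one uniform positional-advance model: map the outcome to an advance N, count runs as runners (batter at position 0) whose position+N reaches home, and build the new bases by shifting positions; k/out and the bb forced-advance chain stay explicit.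
import Mathlib
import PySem

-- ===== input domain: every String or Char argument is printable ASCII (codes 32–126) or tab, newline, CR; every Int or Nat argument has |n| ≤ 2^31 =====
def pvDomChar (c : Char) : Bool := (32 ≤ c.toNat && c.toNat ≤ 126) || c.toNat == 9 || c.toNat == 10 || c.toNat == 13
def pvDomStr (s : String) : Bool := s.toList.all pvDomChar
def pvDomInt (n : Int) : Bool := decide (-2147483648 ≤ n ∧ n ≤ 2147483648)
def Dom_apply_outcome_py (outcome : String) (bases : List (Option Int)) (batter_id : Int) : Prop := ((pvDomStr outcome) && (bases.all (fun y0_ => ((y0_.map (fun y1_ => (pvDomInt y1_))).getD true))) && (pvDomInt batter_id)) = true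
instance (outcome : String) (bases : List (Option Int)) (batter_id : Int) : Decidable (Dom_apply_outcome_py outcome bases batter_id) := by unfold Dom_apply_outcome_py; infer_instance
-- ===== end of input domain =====

-- B replaces the four hardcoded hit branches by one uniform positional-advance model
-- (advance N, count runners whose position+N reaches home, shift positions); objective: simpler.

-- ===== PORT A =====
def apply_outcome_py (outcome : String) (bases : List (Option Int)) (batter_id : Int) : Int × Int × List (Option Int) × Int :=
  match bases with
  | [first, second, third] =>
    if outcome = "k" ∨ outcome = "out" then (0, 1, bases, 0)
    else if outcome = "bb" then
      if first.isSome ∧ second.isSome ∧ third.isSome then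
        (0 + 1, 0, [some batter_id, first, second], 0 + 1)
      else if first.isSome ∧ second.isSome then (0, 0, [some batter_id, first, second], 0)
      else if first.isSome then (0, 0, [some batter_id, first, third], 0)
      else (0, 0, [some batter_id, second, third], 0)
    else if outcome = "1b" then
      if third.isSome then (0 + 1, 0, [some batter_id, first, second], 0 + 1)
      else (0, 0, [some batter_id, first, second], 0)
    else if outcome = "2b" then
      let r1 : Int := if second.isSome then 0 + 1 else 0
      let r2 : Int := if third.isSome then r1 + 1 else r1
      (r2, 0, [none, some batter_id, first], r2)
    else if outcome = "3b" then
      let r : Int := [first, second, third].foldl (fun acc runner => if runner.isSome then acc + 1 else acc) 0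
      (r, 0, [none, none, some batter_id], r)
    else if outcome = "hr" then
      let r : Int := [first, second, third].foldl (fun acc runner => if runner.isSome then acc + 1 else acc) 0
      (r + 1, 0, [none, none, none], r + 1)
    else (0, 0, bases, 0)
  | _ => (0, 0, bases, 0)  -- unreachable under Pre_ (Python raises on unpack)

-- ===== PORT B =====
-- B-side helper: B's body after the 'first, second, third = bases' unpack
def apply_outcome_py_alt_core (outcome : String) (bases : List (Option Int)) (batter_id : Int) (first second third : Option Int) : Int × Int × List (Option Int) × Int :=
  if outcome = "k" ∨ outcome = "out" then (0, 1, bases, 0)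
  else if outcome = "bb" then
    if first = none then (0, 0, [some batter_id, second, third], 0)
    else if second = none then (0, 0, [some batter_id, first, third], 0)
    else if third = none then (0, 0, [some batter_id, first, second], 0)
    else (1, 0, [some batter_id, first, second], 1)
  else
    match (if outcome = "1b" then some 1 else if outcome = "2b" then some 2
           else if outcome = "3b" then some 3 else if outcome = "hr" then some (4 : Nat) else none) with
    | none => (0, 0, bases, 0)
    | some adv =>
      let runners : List (Option Int) := [some batter_id, first, second, third]
      let runs : Int :=
        (((List.range 4).filter (fun pos => 4 ≤ pos + adv ∧ (runners.getD pos none).isSome)).length : Int)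
      let newBases : List (Option Int) :=
        ([1, 2, 3] : List Nat).map (fun p => if adv ≤ p then runners.getD (p - adv) none else none)
      (runs, 0, newBases, runs)

def apply_outcome_py_alt (outcome : String) (bases : List (Option Int)) (batter_id : Int) : Int × Int × List (Option Int) × Int :=
  -- 'first, second, third = bases': needs exactly three elements (else Python raises; unreachable under Pre_)
  if bases.length = 3 then
    apply_outcome_py_alt_core outcome bases batter_id (bases.getD 0 none) (bases.getD 1 none) (bases.getD 2 none)
  else (0, 0, bases, 0)

-- ===== PRECONDITION & SPEC =====
-- Python unpacks 'first, second, third = bases': any list whose length is not 3 raises ValueError.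
def Pre_apply_outcome_py (outcome : String) (bases : List (Option Int)) (batter_id : Int) : Prop := bases.length = 3
instance (outcome : String) (bases : List (Option Int)) (batter_id : Int) : Decidable (Pre_apply_outcome_py outcome bases batter_id) := by unfold Pre_apply_outcome_py; infer_instance
def pvWitness_apply_outcome_py : String × List (Option Int) × Int := ("1b", [some 1, none, some 3], 9)

def Spec_apply_outcome_py (outcome : String) (bases : List (Option Int)) (batter_id : Int) (out : Int × Int × List (Option Int) × Int) : Prop := out = apply_outcome_py_alt outcome bases batter_id
instance (outcome : String) (bases : List (Option Int)) (batter_id : Int) (out : Int × Int × List (Option Int) × Int) : Decidable (Spec_apply_outcome_py outcome bases batter_id out) := by unfold Spec_apply_outcome_py; infer_instance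

-- ===== CLAIM (what is proved, stated in full; the proofs are below) =====
def Claim_equal_apply_outcome_py : Prop := ∀ (outcome : String) (bases : List (Option Int)) (batter_id : Int), Dom_apply_outcome_py outcome bases batter_id → Pre_apply_outcome_py outcome bases batter_id → Spec_apply_outcome_py outcome bases batter_id (apply_outcome_py outcome bases batter_id)

-- ===== LEMMAS AND PROOFS =====

-- ===== VERDICT (by name: the statement is the Claim_ definition above) =====
set_option maxHeartbeats 1600000 in
theorem apply_outcome_py_spec : Claim_equal_apply_outcome_py := by
  intro outcome bases batter_id _ hpre
  match bases with
  | [f, s, t] =>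
    unfold Spec_apply_outcome_py apply_outcome_py apply_outcome_py_alt apply_outcome_py_alt_core
    rcases f with _ | fv <;> rcases s with _ | sv <;> rcases t with _ | tv <;>
      split_ifs <;> simp_all [List.range_succ, List.filter, List.getD]
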